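-- pv_equiv track=rewrite | github.com/EdwardZehuaZhang/3d-printing-monorepo | rhino8-internal-wire/Libraries/wire_router/core.py | _cross_segment_near_approach
-- ===== SOURCE A (Python) =====
-- from typing import Dict, Iterable, Iterator, List, Optional, Sequence, Set, Tuple
--
-- GridIndex = Tuple[int, int, int]
--
-- _DILATION_OFFSET_CACHE: Dict[int, Tuple[Tuple[int, int, int], ...]] = {}
--
-- def _dilation_offsets(radius: int) -> Tuple[Tuple[int, int, int], ...]:
--     """Return cached offset tuples for the given Chebyshev radius."""
--     if radius in _DILATION_OFFSET_CACHE: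
--         return _DILATION_OFFSET_CACHE[radius]
--     offsets = tuple(
--         (dx, dy, dz)
--         for dx in range(-radius, radius + 1)
--         for dy in range(-radius, radius + 1)
--         for dz in range(-radius, radius + 1)
--     )
--     _DILATION_OFFSET_CACHE[radius] = offsets
--     return offsets
--
-- def _cross_segment_near_approach(
--     seg_a: Sequence[GridIndex],
--     seg_b: Sequence[GridIndex],
--     radius: int,
--     shared_node: GridIndex,
--     node_adjacency: int = 2,
-- ) -> bool:
--     """Return True if *seg_b* comes within *radius* cells of *seg_a*
--     (Chebyshev distance), ignoring cells within *node_adjacency* of the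
--     *shared_node* where the two segments meet.
--
--     This catches the case where two consecutive segments approach or leave
--     a node from the same direction, overlapping just outside the node
--     exemption zone.
--     """
--     if radius <= 0:
--         return False
--
--     node_zone = dilate_cells({shared_node}, node_adjacency)
--     a_cells = {cell for cell in seg_a if cell not in node_zone}
--     if not a_cells:
--         return False
--     blocked = dilate_cells(a_cells, radius)
--
--     for cell in seg_b:
--         if cell in node_zone:
--             continue
--         if cell in blocked:
--             return True
--     return False
--
-- def dilate_cells(cells: Iterable[GridIndex], radius: int) -> Set[GridIndex]:
--     cells = set(cells)
--     if radius <= 0: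
--         return set(cells)
--
--     offsets = _dilation_offsets(radius)
--     dilated: Set[GridIndex] = set()
--     for cx, cy, cz in cells:
--         for dx, dy, dz in offsets:
--             dilated.add((cx + dx, cy + dy, cz + dz))
--     return dilated
-- ===== SOURCE B (Python) =====
-- def _cross_segment_near_approach(seg_a, seg_b, radius, shared_node, node_adjacency=2):
--     if radius <= 0:
--         return False
--
--     def near_node(c):
--         if node_adjacency <= 0:
--             return c == shared_node
--         return max(abs(c[0] - shared_node[0]),
--                    abs(c[1] - shared_node[1]),
--                    abs(c[2] - shared_node[2])) <= node_adjacency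
--
--     a_cells = [c for c in seg_a if not near_node(c)]
--     return any(
--         not near_node(b)
--         and max(abs(b[0] - a[0]), abs(b[1] - a[1]), abs(b[2] - a[2])) <= radius
--         for b in seg_b
--         for a in a_cells
--     )
-- ===== Notes on version B (the rewrite author's own statement) =====
-- stated objective: faster
-- what changed: B drops dilate_cells entirely: instead of materialising the dilated node zone and the dilated 'blocked' set, it tests each cell against closed-form Chebyshev-distance predicates (near_node and a direct pairwise seg_b-vs-a_cells distance check with early exit).
import Mathlib
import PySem

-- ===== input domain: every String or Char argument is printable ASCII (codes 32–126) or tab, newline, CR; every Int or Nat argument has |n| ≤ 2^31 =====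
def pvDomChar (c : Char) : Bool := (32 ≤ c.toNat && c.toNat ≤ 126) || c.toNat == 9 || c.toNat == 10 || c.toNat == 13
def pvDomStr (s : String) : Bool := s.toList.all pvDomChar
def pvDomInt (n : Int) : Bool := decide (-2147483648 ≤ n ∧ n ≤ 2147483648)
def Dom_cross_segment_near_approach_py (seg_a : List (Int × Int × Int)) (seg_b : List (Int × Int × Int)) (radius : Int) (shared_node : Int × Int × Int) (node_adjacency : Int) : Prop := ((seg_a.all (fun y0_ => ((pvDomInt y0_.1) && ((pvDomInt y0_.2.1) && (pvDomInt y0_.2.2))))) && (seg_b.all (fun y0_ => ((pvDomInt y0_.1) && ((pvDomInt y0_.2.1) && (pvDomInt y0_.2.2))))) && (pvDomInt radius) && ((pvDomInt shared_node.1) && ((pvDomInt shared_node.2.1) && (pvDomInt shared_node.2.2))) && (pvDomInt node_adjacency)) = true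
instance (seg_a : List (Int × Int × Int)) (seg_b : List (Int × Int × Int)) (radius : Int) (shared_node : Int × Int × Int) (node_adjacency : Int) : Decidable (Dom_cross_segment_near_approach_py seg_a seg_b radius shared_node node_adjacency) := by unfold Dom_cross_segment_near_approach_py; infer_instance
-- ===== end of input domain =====

-- B replaces A's materialised dilated "blocked" set (and dilated node zone) by direct
-- closed-form Chebyshev-distance tests with early exit — objective: simpler.

-- ===== PORT A =====
-- _dilation_offsets(radius) (the cache is behaviourally transparent)
def pv_dilation_offsets (radius : Int) : List (Int × Int × Int) :=
  (PySem.List.pyRange (-radius) (radius + 1) 1).flatMap fun dx =>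
    (PySem.List.pyRange (-radius) (radius + 1) 1).flatMap fun dy =>
      (PySem.List.pyRange (-radius) (radius + 1) 1).map fun dz => (dx, dy, dz)

-- dilate_cells(cells, radius). Its result is only ever consumed through membership
-- tests (never through Python's set-iteration order), so the returned set is backed by
-- Std.HashSet for feasible evaluation; 'for cx, cy, cz in cells' iterates over the
-- distinct elements of set(cells) (PySem.Set.ofList cells) — the resulting SET does not
-- depend on that iteration order (proved by pv_mem_foldl_dilate).
def pv_dilate_cells (cells : List (Int × Int × Int)) (radius : Int) : Std.HashSet (Int × Int × Int) :=
  let cellsS : PySem.Set (Int × Int × Int) := PySem.Set.ofList cells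
  if radius ≤ 0 then Std.HashSet.ofList cellsS
  else
    let offsets := pv_dilation_offsets radius
    cellsS.foldl
      (fun dil c =>
        offsets.foldl (fun dil o => dil.insert (c.1 + o.1, c.2.1 + o.2.1, c.2.2 + o.2.2)) dil)
      (∅ : Std.HashSet (Int × Int × Int))

-- the 'for cell in seg_b: … continue/return True' loop of A
def pv_loopA (node_zone blocked : Std.HashSet (Int × Int × Int)) : List (Int × Int × Int) → Bool
  | [] => false
  | c :: rest =>
    if node_zone.contains c then pv_loopA node_zone blocked rest
    else if blocked.contains c then true
    else pv_loopA node_zone blocked rest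

def cross_segment_near_approach_py (seg_a : List (Int × Int × Int)) (seg_b : List (Int × Int × Int)) (radius : Int) (shared_node : Int × Int × Int) (node_adjacency : Int) : Bool :=
  if radius ≤ 0 then false
  else
    let node_zone := pv_dilate_cells [shared_node] node_adjacency
    let a_cells : PySem.Set (Int × Int × Int) :=
      PySem.Set.ofList (seg_a.filter fun c => !(node_zone.contains c))
    if a_cells = [] then false
    else
      let blocked := pv_dilate_cells a_cells radius
      pv_loopA node_zone blocked seg_b

-- ===== PORT B =====
-- near_node(c): closed-form membership in the node exemption zone
def pv_near_node (shared_node : Int × Int × Int) (node_adjacency : Int) (c : Int × Int × Int) : Bool :=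
  if node_adjacency ≤ 0 then c == shared_node
  else
    decide (max |c.1 - shared_node.1| (max |c.2.1 - shared_node.2.1| |c.2.2 - shared_node.2.2|) ≤ node_adjacency)

def cross_segment_near_approach_py_alt (seg_a : List (Int × Int × Int)) (seg_b : List (Int × Int × Int)) (radius : Int) (shared_node : Int × Int × Int) (node_adjacency : Int) : Bool :=
  if radius ≤ 0 then false
  else
    let a_cells := seg_a.filter fun c => !(pv_near_node shared_node node_adjacency c)
    seg_b.any fun b =>
      !(pv_near_node shared_node node_adjacency b) &&
        a_cells.any fun a =>
          decide (max |b.1 - a.1| (max |b.2.1 - a.2.1| |b.2.2 - a.2.2|) ≤ radius)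

-- ===== PRECONDITION & SPEC =====
def Spec_cross_segment_near_approach_py (seg_a : List (Int × Int × Int)) (seg_b : List (Int × Int × Int)) (radius : Int) (shared_node : Int × Int × Int) (node_adjacency : Int) (out : Bool) : Prop := out = cross_segment_near_approach_py_alt seg_a seg_b radius shared_node node_adjacency
instance (seg_a : List (Int × Int × Int)) (seg_b : List (Int × Int × Int)) (radius : Int) (shared_node : Int × Int × Int) (node_adjacency : Int) (out : Bool) : Decidable (Spec_cross_segment_near_approach_py seg_a seg_b radius shared_node node_adjacency out) := by unfold Spec_cross_segment_near_approach_py; infer_instance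

-- ===== CLAIM (what is proved, stated in full; the proofs are below) =====
def Claim_equal_cross_segment_near_approach_py : Prop := ∀ (seg_a : List (Int × Int × Int)) (seg_b : List (Int × Int × Int)) (radius : Int) (shared_node : Int × Int × Int) (node_adjacency : Int), Dom_cross_segment_near_approach_py seg_a seg_b radius shared_node node_adjacency → Spec_cross_segment_near_approach_py seg_a seg_b radius shared_node node_adjacency (cross_segment_near_approach_py seg_a seg_b radius shared_node node_adjacency)

-- ===== LEMMAS AND PROOFS =====

theorem pv_mem_offsets (r : Int) (o : Int × Int × Int) :
    o ∈ pv_dilation_offsets r ↔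
      -r ≤ o.1 ∧ o.1 ≤ r ∧ -r ≤ o.2.1 ∧ o.2.1 ≤ r ∧ -r ≤ o.2.2 ∧ o.2.2 ≤ r := by
  obtain ⟨dx, dy, dz⟩ := o
  simp only [pv_dilation_offsets, List.mem_flatMap, List.mem_map, PySem.List.mem_pyRange_one,
    Prod.mk.injEq]
  constructor
  · rintro ⟨x, hx, y, hy, z, hz, rfl, rfl, rfl⟩
    omega
  · rintro ⟨h1, h2, h3, h4, h5, h6⟩
    exact ⟨dx, by omega, dy, by omega, dz, by omega, rfl, rfl, rfl⟩

theorem pv_mem_foldl_insert {β : Type} (f : β → Int × Int × Int) (l : List β)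
    (s : Std.HashSet (Int × Int × Int)) (x : Int × Int × Int) :
    x ∈ l.foldl (fun s b => s.insert (f b)) s ↔ x ∈ s ∨ ∃ b ∈ l, x = f b := by
  induction l generalizing s with
  | nil => simp
  | cons b l ih =>
    simp only [List.foldl_cons, ih, Std.HashSet.mem_insert, beq_iff_eq, List.mem_cons]
    constructor
    · rintro ((rfl | h) | ⟨b', hb', rfl⟩)
      · exact Or.inr ⟨b, Or.inl rfl, rfl⟩
      · exact Or.inl h
      · exact Or.inr ⟨b', Or.inr hb', rfl⟩
    · rintro (h | ⟨b', (rfl | hb'), rfl⟩)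
      · exact Or.inl (Or.inr h)
      · exact Or.inl (Or.inl rfl)
      · exact Or.inr ⟨b', hb', rfl⟩

theorem pv_mem_foldl_dilate (off : List (Int × Int × Int)) (cs : List (Int × Int × Int))
    (init : Std.HashSet (Int × Int × Int)) (x : Int × Int × Int) :
    x ∈ cs.foldl
      (fun dil c =>
        off.foldl (fun dil o => dil.insert (c.1 + o.1, c.2.1 + o.2.1, c.2.2 + o.2.2)) dil)
      init ↔
    x ∈ init ∨ ∃ c ∈ cs, ∃ o ∈ off, x = (c.1 + o.1, c.2.1 + o.2.1, c.2.2 + o.2.2) := by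
  induction cs generalizing init with
  | nil => simp
  | cons c cs ih =>
    simp only [List.foldl_cons, ih, pv_mem_foldl_insert, List.mem_cons]
    constructor
    · rintro (⟨h | ⟨o, ho, rfl⟩⟩ | ⟨c', hc', o, ho, rfl⟩)
      · exact Or.inl h
      · exact Or.inr ⟨c, Or.inl rfl, o, ho, rfl⟩
      · exact Or.inr ⟨c', Or.inr hc', o, ho, rfl⟩
    · rintro (h | ⟨c', (rfl | hc'), o, ho, rfl⟩)
      · exact Or.inl (Or.inl h)
      · exact Or.inl (Or.inr ⟨o, ho, rfl⟩)
      · exact Or.inr ⟨c', hc', o, ho, rfl⟩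

theorem pv_mem_dilate_pos (cells : List (Int × Int × Int)) (r : Int) (hr : 0 < r)
    (x : Int × Int × Int) :
    x ∈ pv_dilate_cells cells r ↔
      ∃ c ∈ cells, max |x.1 - c.1| (max |x.2.1 - c.2.1| |x.2.2 - c.2.2|) ≤ r := by
  unfold pv_dilate_cells
  rw [if_neg (by omega)]
  simp only [pv_mem_foldl_dilate, PySem.Set.mem_ofList]
  constructor
  · rintro (h | ⟨c, hc, o, ho, rfl⟩)
    · exact absurd h (Std.HashSet.not_mem_empty)
    · rw [pv_mem_offsets] at ho
      refine ⟨c, hc, ?_⟩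
      obtain ⟨c1, c2, c3⟩ := c
      obtain ⟨o1, o2, o3⟩ := o
      simp only [max_le_iff, abs_le] at ho ⊢
      omega
  · rintro ⟨c, hc, h⟩
    refine Or.inr ⟨c, hc, (x.1 - c.1, x.2.1 - c.2.1, x.2.2 - c.2.2), ?_, ?_⟩
    · rw [pv_mem_offsets]
      simp only [max_le_iff, abs_le] at h
      simp only
      omega
    · obtain ⟨a, b, d⟩ := x
      simp

-- membership in A's node_zone is B's near_node test
theorem pv_mem_node_zone (sn : Int × Int × Int) (adj : Int) (c : Int × Int × Int) :
    c ∈ pv_dilate_cells [sn] adj ↔ pv_near_node sn adj c = true := by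
  unfold pv_near_node
  by_cases h : adj ≤ 0
  · rw [if_pos h]
    unfold pv_dilate_cells
    rw [if_pos h]
    simp [PySem.Set.ofList, PySem.Set.add, PySem.Set.contains, PySem.Set.empty, beq_iff_eq]
    exact eq_comm
  · rw [if_neg h, pv_mem_dilate_pos _ _ (by omega)]
    simp

theorem pv_contains_node_zone (sn : Int × Int × Int) (adj : Int) (c : Int × Int × Int) :
    (pv_dilate_cells [sn] adj).contains c = pv_near_node sn adj c := by
  rw [Bool.eq_iff_iff, Std.HashSet.contains_iff_mem, pv_mem_node_zone]

-- A's loop equals B's `any` over seg_b, given the two set-membership characterisations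
theorem pv_loopA_eq (sn : Int × Int × Int) (adj : Int)
    (blocked : Std.HashSet (Int × Int × Int)) (aC : List (Int × Int × Int))
    (hb : ∀ c, blocked.contains c =
        aC.any fun a => decide (max |c.1 - a.1| (max |c.2.1 - a.2.1| |c.2.2 - a.2.2|) ≤ r))
    (seg_b : List (Int × Int × Int)) :
    pv_loopA (pv_dilate_cells [sn] adj) blocked seg_b =
      seg_b.any fun b => !(pv_near_node sn adj b) &&
        aC.any fun a => decide (max |b.1 - a.1| (max |b.2.1 - a.2.1| |b.2.2 - a.2.2|) ≤ r) := by
  induction seg_b with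
  | nil => rfl
  | cons b rest ih =>
    simp only [pv_loopA, List.any_cons, pv_contains_node_zone, ← ih, hb b]
    by_cases hz : pv_near_node sn adj b = true
    · simp [hz]
    · simp only [Bool.not_eq_true] at hz
      cases hblk : (aC.any fun a =>
          decide (max |b.1 - a.1| (max |b.2.1 - a.2.1| |b.2.2 - a.2.2|) ≤ r))
      · simp [hz]
      · simp [hz]

-- ===== VERDICT (by name: the statement is the Claim_ definition above) =====
theorem cross_segment_near_approach_py_spec : Claim_equal_cross_segment_near_approach_py := by
  intro seg_a seg_b radius shared_node node_adjacency _
  unfold Spec_cross_segment_near_approach_py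
  unfold cross_segment_near_approach_py cross_segment_near_approach_py_alt
  by_cases hr : radius ≤ 0
  · simp [hr]
  · rw [if_neg hr, if_neg hr]
    simp only
    have hfilter :
        (seg_a.filter fun c => !((pv_dilate_cells [shared_node] node_adjacency).contains c)) =
        (seg_a.filter fun c => !(pv_near_node shared_node node_adjacency c)) := by
      apply List.filter_congr
      intro c _
      rw [pv_contains_node_zone]
    rw [hfilter]
    set aC := seg_a.filter fun c => !(pv_near_node shared_node node_adjacency c) with haC
    by_cases hempty : PySem.Set.ofList aC = ([] : List (Int × Int × Int))
    · rw [if_pos hempty]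
      have : aC = [] := by
        cases h : aC with
        | nil => rfl
        | cons x xs =>
          exfalso
          have : x ∈ PySem.Set.ofList aC := (PySem.Set.mem_ofList _ _).mpr (by rw [h]; exact List.mem_cons_self ..)
          rw [hempty] at this; simp at this
      rw [this]
      simp
    · rw [if_neg hempty]
      rw [pv_loopA_eq (r := radius) shared_node node_adjacency _ aC ?_ seg_b]
      intro c
      rw [Bool.eq_iff_iff, Std.HashSet.contains_iff_mem,
        pv_mem_dilate_pos _ _ (by omega), List.any_eq_true]
      constructor
      · rintro ⟨a, ha, h⟩
        exact ⟨a, (PySem.Set.mem_ofList _ _).mp ha, by simpa using h⟩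
      · rintro ⟨a, ha, h⟩
        exact ⟨a, (PySem.Set.mem_ofList _ _).mpr ha, by simpa using h⟩
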